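-- pv_equiv track=rewrite | github.com/catch1981/Welcomefairydiscordbot | web_bot.py | choose_path
-- ===== SOURCE A (Python) =====
-- def choose_path(first: str, second: str) -> str:
--     """Challenge-first chooser (no LLM)."""
--     t = f"{first}\n{second}".lower()
--     witch_keys = ["ritual", "symbol", "dream", "myth", "sigil", "intuition", "divination", "poetry", "pattern", "craft"]
--     toes_keys  = ["schedule", "budget", "rep", "sleep", "nutrition", "practice", "mileage", "discipline", "weekly"]
--     fracture_keys = ["stuck", "block", "fear", "comfort", "avoid", "procrast", "perfection", "control", "anxiety"]
--
--     score = {"Witch":0, "Fracture":0, "Forty Toes":0}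
--     score["Fracture"] += sum(k in t for k in fracture_keys) * 2
--     score["Witch"]    += sum(k in t for k in witch_keys)
--     score["Forty Toes"] += sum(k in t for k in toes_keys)
--
--     best = max(score, key=score.get)
--     if len({v for v in score.values()}) == 1:
--         best = "Fracture"  # bias to test > ease
--     return best
-- ===== SOURCE B (Python) =====
-- _TABLE = [
--     ("ritual", "Witch", 1), ("symbol", "Witch", 1), ("dream", "Witch", 1),
--     ("myth", "Witch", 1), ("sigil", "Witch", 1), ("intuition", "Witch", 1),
--     ("divination", "Witch", 1), ("poetry", "Witch", 1), ("pattern", "Witch", 1),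
--     ("craft", "Witch", 1),
--     ("stuck", "Fracture", 2), ("block", "Fracture", 2), ("fear", "Fracture", 2),
--     ("comfort", "Fracture", 2), ("avoid", "Fracture", 2), ("procrast", "Fracture", 2),
--     ("perfection", "Fracture", 2), ("control", "Fracture", 2), ("anxiety", "Fracture", 2),
--     ("schedule", "Forty Toes", 1), ("budget", "Forty Toes", 1), ("rep", "Forty Toes", 1),
--     ("sleep", "Forty Toes", 1), ("nutrition", "Forty Toes", 1), ("practice", "Forty Toes", 1),
--     ("mileage", "Forty Toes", 1), ("discipline", "Forty Toes", 1), ("weekly", "Forty Toes", 1),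
-- ]
--
--
-- def choose_path(first: str, second: str) -> str:
--     # Text-driven multi-pattern scan: walk the text once; at each position fire
--     # every still-pending keyword that starts there, retire it, and stop early
--     # once every keyword has been found.
--     t = (first + "\n" + second).lower()
--     pending = list(_TABLE)
--     w = f = ft = 0
--     for i in range(len(t)):
--         if not pending:
--             break
--         still = []
--         for kw, cat, wt in pending:
--             if t.startswith(kw, i):
--                 if cat == "Witch":
--                     w += wt
--                 elif cat == "Fracture":
--                     f += wt
--                 else:
--                     ft += wt
--             else:
--                 still.append((kw, cat, wt))
--         pending = still
--     if w == f == ft: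
--         return "Fracture"
--     if w >= f and w >= ft:
--         return "Witch"
--     if f >= ft:
--         return "Fracture"
--     return "Forty Toes"
-- ===== Notes on version B (the rewrite author's own statement) =====
-- stated objective: alternative
-- what changed: A runs one full substring search over the text per keyword and picks the winner with max(score, key=score.get) plus a set-of-values check; B instead walks the text once position by position, firing and retiring every pending keyword that starts at the current position (naive multi-pattern matching with early exit), and resolves the winner with an explicit comparison chain.
import Mathlib
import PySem

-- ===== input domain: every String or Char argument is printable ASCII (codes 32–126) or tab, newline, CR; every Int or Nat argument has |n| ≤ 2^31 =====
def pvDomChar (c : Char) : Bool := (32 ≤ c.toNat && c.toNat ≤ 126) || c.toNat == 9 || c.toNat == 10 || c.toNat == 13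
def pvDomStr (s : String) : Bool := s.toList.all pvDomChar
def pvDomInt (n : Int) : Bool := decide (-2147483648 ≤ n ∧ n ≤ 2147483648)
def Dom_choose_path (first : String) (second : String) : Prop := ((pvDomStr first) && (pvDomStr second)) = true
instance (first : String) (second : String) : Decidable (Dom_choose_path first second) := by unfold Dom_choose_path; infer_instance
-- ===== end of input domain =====

-- B replaces A's per-keyword substring searches + max(score, key=score.get) + set-of-values
-- check by a single position-by-position walk over the text that fires and retires pending
-- keywords (naive multi-pattern scan with early exit) and an explicit comparison chain
-- (objective: alternative algorithm, same asymptotic cost).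

-- ===== PORT A =====
-- Literal port of A: local keyword lists, a dict of scores bumped per category,
-- max over the keys by score.get, and the all-values-equal override.
def choose_path (first : String) (second : String) : String :=
  let t := PySem.Chars.lower (first.toList ++ '\n' :: second.toList)
  let witch_keys : List String := ["ritual", "symbol", "dream", "myth", "sigil", "intuition", "divination", "poetry", "pattern", "craft"]
  let toes_keys : List String := ["schedule", "budget", "rep", "sleep", "nutrition", "practice", "mileage", "discipline", "weekly"]
  let fracture_keys : List String := ["stuck", "block", "fear", "comfort", "avoid", "procrast", "perfection", "control", "anxiety"]
  let score : PySem.Dict String Int := PySem.Dict.mk [("Witch", 0), ("Fracture", 0), ("Forty Toes", 0)]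
  let score := score.insert "Fracture" (score.getD "Fracture" 0 + (fracture_keys.map (fun k => if PySem.Chars.isIn k.toList t then (1 : Int) else 0)).sum * 2)
  let score := score.insert "Witch" (score.getD "Witch" 0 + (witch_keys.map (fun k => if PySem.Chars.isIn k.toList t then (1 : Int) else 0)).sum)
  let score := score.insert "Forty Toes" (score.getD "Forty Toes" 0 + (toes_keys.map (fun k => if PySem.Chars.isIn k.toList t then (1 : Int) else 0)).sum)
  let best := match PySem.List.max? (PySem.Dict.keys score) (fun k => score.getD k 0) with
    | some b => b
    | none => ""  -- unreachable: the dict always has three keys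
  if (PySem.Set.ofList (PySem.Dict.values score)).length == 1 then "Fracture" else best

-- ===== PORT B =====
-- Source B's flat module-level table (keyword, category, weight).
def pvTable : List (String × String × Int) :=
  [("ritual", "Witch", 1), ("symbol", "Witch", 1), ("dream", "Witch", 1),
   ("myth", "Witch", 1), ("sigil", "Witch", 1), ("intuition", "Witch", 1),
   ("divination", "Witch", 1), ("poetry", "Witch", 1), ("pattern", "Witch", 1),
   ("craft", "Witch", 1),
   ("stuck", "Fracture", 2), ("block", "Fracture", 2), ("fear", "Fracture", 2),
   ("comfort", "Fracture", 2), ("avoid", "Fracture", 2), ("procrast", "Fracture", 2),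
   ("perfection", "Fracture", 2), ("control", "Fracture", 2), ("anxiety", "Fracture", 2),
   ("schedule", "Forty Toes", 1), ("budget", "Forty Toes", 1), ("rep", "Forty Toes", 1),
   ("sleep", "Forty Toes", 1), ("nutrition", "Forty Toes", 1), ("practice", "Forty Toes", 1),
   ("mileage", "Forty Toes", 1), ("discipline", "Forty Toes", 1), ("weekly", "Forty Toes", 1)]

-- the inner `for kw, cat, wt in pending` loop at one position: fires matching keywords
-- into the counters, keeps the rest as the new pending list
def pvInner (s : List Char) : List (String × String × Int) → (Int × Int × Int) →
    (List (String × String × Int) × (Int × Int × Int))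
  | [], acc => ([], acc)
  | e :: es, acc =>
      if PySem.Chars.startswith s e.1.toList then
        pvInner s es
          (if e.2.1 == "Witch" then (acc.1 + e.2.2, acc.2.1, acc.2.2)
           else if e.2.1 == "Fracture" then (acc.1, acc.2.1 + e.2.2, acc.2.2)
           else (acc.1, acc.2.1, acc.2.2 + e.2.2))
      else
        let r := pvInner s es acc
        (e :: r.1, r.2)

-- the outer `for i in range(len(t))` loop: one step per text position (suffix), early break
-- when no keyword is pending
def pvScan : List Char → List (String × String × Int) → (Int × Int × Int) → (Int × Int × Int)
  | [], _, acc => acc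
  | c :: rest, pending, acc =>
      if pending.isEmpty then acc
      else
        let r := pvInner (c :: rest) pending acc
        pvScan rest r.1 r.2

def choose_path_alt (first : String) (second : String) : String :=
  let t := PySem.Chars.lower (first.toList ++ '\n' :: second.toList)
  let acc := pvScan t pvTable (0, 0, 0)
  if acc.1 = acc.2.1 ∧ acc.2.1 = acc.2.2 then "Fracture"
  else if acc.2.1 ≤ acc.1 ∧ acc.2.2 ≤ acc.1 then "Witch"
  else if acc.2.2 ≤ acc.2.1 then "Fracture"
  else "Forty Toes"

-- ===== PRECONDITION & SPEC =====
def Spec_choose_path (first : String) (second : String) (out : String) : Prop := out = choose_path_alt first second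
instance (first : String) (second : String) (out : String) : Decidable (Spec_choose_path first second out) := by unfold Spec_choose_path; infer_instance

-- ===== CLAIM (what is proved, stated in full; the proofs are below) =====
def Claim_equal_choose_path : Prop := ∀ (first : String) (second : String), Dom_choose_path first second → Spec_choose_path first second (choose_path first second)

-- ===== LEMMAS AND PROOFS =====

-- category weight vector of a table entry
def pvVec (e : String × String × Int) : Int × Int × Int :=
  if e.2.1 == "Witch" then (e.2.2, 0, 0)
  else if e.2.1 == "Fracture" then (0, e.2.2, 0)
  else (0, 0, e.2.2)

-- what one entry contributes to the final counters given the remaining text t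
def pvContrib (t : List Char) (e : String × String × Int) : Int × Int × Int :=
  if e.1.toList <:+: t then pvVec e else (0, 0, 0)

lemma pvInner_spec (s : List Char) (es : List (String × String × Int)) (acc : Int × Int × Int) :
    pvInner s es acc =
      (es.filter (fun e => ¬ PySem.Chars.startswith s e.1.toList),
       acc + ((es.filter (fun e => PySem.Chars.startswith s e.1.toList)).map pvVec).sum) := by
  induction es generalizing acc with
  | nil => simp [pvInner]
  | cons e es ih =>
    by_cases h : PySem.Chars.startswith s e.1.toList = true
    · simp only [pvInner, h, List.filter_cons, ih]
      simp [pvVec]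
      split_ifs <;> simp [Prod.ext_iff, Prod.fst_add, Prod.snd_add] <;> (try ring)
    · simp only [pvInner, h, List.filter_cons, ih]
      simp

lemma pvContrib_cons (c : Char) (rest : List Char) (e : String × String × Int) :
    pvContrib (c :: rest) e =
      (if PySem.Chars.startswith (c :: rest) e.1.toList then pvVec e else pvContrib rest e) := by
  by_cases h : e.1.toList <+: c :: rest
  · have : PySem.Chars.startswith (c :: rest) e.1.toList = true :=
      (PySem.Chars.startswith_iff _ _).mpr h
    simp [pvContrib, this, List.infix_cons_iff, h]
  · have : PySem.Chars.startswith (c :: rest) e.1.toList = false := by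
      rw [Bool.eq_false_iff]; intro hh; exact h ((PySem.Chars.startswith_iff _ _).mp hh)
    simp [pvContrib, this, List.infix_cons_iff, h]

lemma sum_map_ite_split {α β : Type} [AddCommMonoid β] (p : α → Bool) (f g : α → β) (l : List α) :
    (l.map (fun e => if p e then f e else g e)).sum =
      ((l.filter p).map f).sum + ((l.filter (fun e => ¬ p e)).map g).sum := by
  induction l with
  | nil => simp
  | cons e es ih =>
    by_cases h : p e = true <;>
      simp [h, ih, add_assoc, add_left_comm]

lemma pvScan_spec (t : List Char) (pending : List (String × String × Int))
    (acc : Int × Int × Int) (hne : ∀ e ∈ pending, e.1.toList ≠ []) :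
    pvScan t pending acc = acc + (pending.map (pvContrib t)).sum := by
  induction t generalizing pending acc with
  | nil =>
    have : ∀ e ∈ pending, pvContrib [] e = (0, 0, 0) := by
      intro e he
      simp only [pvContrib, List.infix_nil]
      rw [if_neg (hne e he)]
    rw [List.map_congr_left this]
    simp [pvScan]
  | cons c rest ih =>
    by_cases hp : pending = []
    · subst hp; simp [pvScan]
    · have hpe : pending.isEmpty = false := by simp [hp]
      rw [pvScan, if_neg (by simp [hpe]), pvInner_spec,
        ih _ _ (fun e he => hne e (List.mem_filter.mp he).1)]
      have : (pending.map (pvContrib (c :: rest))).sum =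
          (pending.map (fun e => if PySem.Chars.startswith (c :: rest) e.1.toList then pvVec e
            else pvContrib rest e)).sum := by
        rw [List.map_congr_left (fun e he => pvContrib_cons c rest e)]
      rw [this, sum_map_ite_split]
      simp [add_assoc]

lemma ite_pair {α β : Type} {p : Prop} [Decidable p] (a b : α) (c d : β) :
    (if p then (a, c) else (b, d)) = ((if p then a else b), (if p then c else d)) := by
  split <;> rfl

lemma two_ite {p : Prop} [Decidable p] :
    (if p then (2 : Int) else 0) = 2 * (if p then 1 else 0) := by
  split <;> ring

-- per-category membership count, as A's sum() comprehensions compute it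
def countI (ks : List String) (t : List Char) : Int :=
  (ks.map (fun k => if PySem.Chars.isIn k.toList t then (1 : Int) else 0)).sum

lemma ite_infix_isIn (k t : List Char) (x : Int) :
    (if k <:+: t then x else 0) = (if PySem.Chars.isIn k t then x else 0) := by
  by_cases h : k <:+: t
  · simp [h, (PySem.Chars.isIn_iff_infix k t).mpr h]
  · have : PySem.Chars.isIn k t = false := by
      rw [Bool.eq_false_iff]; intro hh; exact h ((PySem.Chars.isIn_iff_infix k t).mp hh)
    simp [h, this]

lemma pvTable_sum (t : List Char) :
    (pvTable.map (pvContrib t)).sum =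
      (countI ["ritual", "symbol", "dream", "myth", "sigil", "intuition", "divination", "poetry", "pattern", "craft"] t,
       countI ["stuck", "block", "fear", "comfort", "avoid", "procrast", "perfection", "control", "anxiety"] t * 2,
       countI ["schedule", "budget", "rep", "sleep", "nutrition", "practice", "mileage", "discipline", "weekly"] t) := by
  simp only [pvTable, countI, List.map, List.sum_cons, List.sum_nil, pvContrib, pvVec]
  simp only [ite_infix_isIn, ite_pair, beq_self_eq_true, if_true, beq_iff_eq,
    String.reduceEq, if_false, Prod.mk_add_mk, add_zero, Prod.mk.injEq]
  refine ⟨?_, ?_, ?_⟩ <;> (simp only [ite_self, two_ite, add_zero, zero_add]; try ring)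

-- A's dict pipeline + max + all-equal override, evaluated at symbolic scores,
-- equals B's comparison chain.
set_option maxHeartbeats 1000000 in
lemma pvEndgame (w f tt : Int) :
    (let score : PySem.Dict String Int := PySem.Dict.mk [("Witch", 0), ("Fracture", 0), ("Forty Toes", 0)]
     let score := score.insert "Fracture" (score.getD "Fracture" 0 + f)
     let score := score.insert "Witch" (score.getD "Witch" 0 + w)
     let score := score.insert "Forty Toes" (score.getD "Forty Toes" 0 + tt)
     let best := match PySem.List.max? (PySem.Dict.keys score) (fun k => score.getD k 0) with
       | some b => b
       | none => ""
     if (PySem.Set.ofList (PySem.Dict.values score)).length == 1 then "Fracture" else best) =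
    (if w = f ∧ f = tt then "Fracture"
     else if f ≤ w ∧ tt ≤ w then "Witch"
     else if tt ≤ f then "Fracture"
     else "Forty Toes") := by
  simp [PySem.Dict.insert, PySem.Dict.contains, PySem.Dict.keys, PySem.Dict.values,
    PySem.List.max?, PySem.Dict.getD, PySem.Dict.get?, PySem.Set.ofList, PySem.Set.add,
    PySem.Set.contains, PySem.Set.empty]
  split_ifs <;> simp_all <;> (try (split_ifs <;> simp_all)) <;> omega

theorem choose_path_eq_alt (first second : String) :
    choose_path first second = choose_path_alt first second := by
  have hne : ∀ e ∈ pvTable, e.1.toList ≠ [] := by decide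
  have hB := pvScan_spec (PySem.Chars.lower (first.toList ++ '\n' :: second.toList)) pvTable (0, 0, 0) hne
  rw [pvTable_sum] at hB
  simp only [choose_path, choose_path_alt, hB, Prod.mk_add_mk, zero_add]
  exact pvEndgame _ _ _

-- ===== VERDICT (by name: the statement is the Claim_ definition above) =====
theorem choose_path_spec : Claim_equal_choose_path := by
  intro first second _
  exact choose_path_eq_alt first second
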